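-- pv_equiv track=rewrite | github.com/Julesc013/dominium | tools/compatx/core/migration_runner.py | validate_matrix_coverage
-- ===== SOURCE A (Python) =====
-- from typing import Any, Dict, Iterable, List, Tuple
--
-- def validate_matrix_coverage(matrix_entries: Iterable[Dict[str, Any]], migration_ids: Iterable[str]) -> List[str]:
--     available = set(str(item).strip() for item in migration_ids if str(item).strip())
--     errors: List[str] = []
--     for row in matrix_entries:
--         if not bool(row.get("migration_required", False)):
--             continue
--         migration_id = str(row.get("migration_id", "")).strip()
--         if not migration_id:
--             errors.append("refuse.compat_matrix_migration_id")
--             continue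
--         if migration_id not in available:
--             errors.append("refuse.compat_matrix_missing_migration")
--     return sorted(set(errors))
-- ===== SOURCE B (Python) =====
-- def validate_matrix_coverage(matrix_entries, migration_ids):
--     available = set(str(item).strip() for item in migration_ids if str(item).strip())
--     ids = [str(row.get("migration_id", "")).strip()
--            for row in matrix_entries
--            if bool(row.get("migration_required", False))]
--     has_empty = any(not mid for mid in ids)
--     has_missing = any(mid and mid not in available for mid in ids)
--     out = []
--     if has_empty:
--         out.append("refuse.compat_matrix_migration_id")
--     if has_missing:
--         out.append("refuse.compat_matrix_missing_migration")
--     return out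
-- ===== Notes on version B (the rewrite author's own statement) =====
-- stated objective: simpler
-- what changed: Instead of accumulating error strings in a list and then deduplicating and sorting them, B materialises the relevant migration ids once and computes two independent boolean existence checks with any(), emitting the (at most two) error codes directly in their sorted order with no sort or set-dedup of the result.
import Mathlib
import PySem

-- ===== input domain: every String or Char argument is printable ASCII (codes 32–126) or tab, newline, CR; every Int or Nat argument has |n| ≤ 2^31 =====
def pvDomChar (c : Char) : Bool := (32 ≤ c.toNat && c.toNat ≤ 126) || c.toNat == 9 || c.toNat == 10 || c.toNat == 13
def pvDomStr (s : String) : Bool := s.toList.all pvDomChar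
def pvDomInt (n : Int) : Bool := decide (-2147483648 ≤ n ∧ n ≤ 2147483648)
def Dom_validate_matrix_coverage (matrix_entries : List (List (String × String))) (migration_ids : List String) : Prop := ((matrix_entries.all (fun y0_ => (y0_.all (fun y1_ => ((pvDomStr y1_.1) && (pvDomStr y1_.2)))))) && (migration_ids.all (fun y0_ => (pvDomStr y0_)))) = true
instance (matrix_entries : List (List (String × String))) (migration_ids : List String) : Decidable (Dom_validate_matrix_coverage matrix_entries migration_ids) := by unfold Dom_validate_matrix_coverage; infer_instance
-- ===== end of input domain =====

-- B replaces A's accumulate-then-dedup-then-sort pass by one id materialisation plus two any() existence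
-- checks, emitting the (at most two) error codes directly in sorted order; objective: simpler.

-- ===== PORT A =====
-- shared primitive ports of the Python expressions both sources contain verbatim:
-- set(str(item).strip() for item in migration_ids if str(item).strip())
def pvAvailable (migration_ids : List String) : PySem.Set String :=
  PySem.Set.ofList (migration_ids.filterMap (fun item =>
    if PySem.Str.strip item == "" then none else some (PySem.Str.strip item)))

-- bool(row.get("migration_required", False)) : default False is falsy; a present string value is truthy iff nonempty
def pvRequired (row : List (String × String)) : Bool :=
  match (PySem.Dict.mk row).get? "migration_required" with
  | none => false
  | some s => !(s == "")

-- str(row.get("migration_id", "")).strip()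
def pvMid (row : List (String × String)) : String :=
  PySem.Str.strip ((PySem.Dict.mk row).getD "migration_id" "")

def validate_matrix_coverage (matrix_entries : List (List (String × String))) (migration_ids : List String) : List String :=
  let available := pvAvailable migration_ids
  let errors := matrix_entries.foldl (fun errors row =>
    if !(pvRequired row) then errors
    else if pvMid row == "" then errors ++ ["refuse.compat_matrix_migration_id"]
    else if !(PySem.Set.contains available (pvMid row)) then errors ++ ["refuse.compat_matrix_missing_migration"]
    else errors) []
  PySem.List.sorted (PySem.Set.ofList errors) (fun x => x) false

-- ===== PORT B =====
def validate_matrix_coverage_alt (matrix_entries : List (List (String × String))) (migration_ids : List String) : List String :=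
  let available := pvAvailable migration_ids
  let ids := (matrix_entries.filter (fun row => pvRequired row)).map pvMid
  let hasEmpty := ids.any (fun mid => mid == "")
  let hasMissing := ids.any (fun mid => !(mid == "") && !(PySem.Set.contains available mid))
  (if hasEmpty then ["refuse.compat_matrix_migration_id"] else []) ++
  (if hasMissing then ["refuse.compat_matrix_missing_migration"] else [])

-- ===== PRECONDITION & SPEC =====
def Spec_validate_matrix_coverage (matrix_entries : List (List (String × String))) (migration_ids : List String) (out : List String) : Prop := out = validate_matrix_coverage_alt matrix_entries migration_ids
instance (matrix_entries : List (List (String × String))) (migration_ids : List String) (out : List String) : Decidable (Spec_validate_matrix_coverage matrix_entries migration_ids out) := by unfold Spec_validate_matrix_coverage; infer_instance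

-- ===== CLAIM (what is proved, stated in full; the proofs are below) =====
def Claim_equal_validate_matrix_coverage : Prop := ∀ (matrix_entries : List (List (String × String))) (migration_ids : List String), Dom_validate_matrix_coverage matrix_entries migration_ids → Spec_validate_matrix_coverage matrix_entries migration_ids (validate_matrix_coverage matrix_entries migration_ids)

-- ===== LEMMAS AND PROOFS =====

theorem pvE1_lt_E2 : ("refuse.compat_matrix_migration_id" : String) < "refuse.compat_matrix_missing_migration" := by
  rw [String.lt_iff_toList_lt]
  show List.Lex (· < ·) _ _
  decide

-- the error strings one row contributes in A's loop
def pvRowErrs (avail : PySem.Set String) (row : List (String × String)) : List String :=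
  if !(pvRequired row) then []
  else if pvMid row == "" then ["refuse.compat_matrix_migration_id"]
  else if !(PySem.Set.contains avail (pvMid row)) then ["refuse.compat_matrix_missing_migration"]
  else []

theorem pvFoldA (avail : PySem.Set String) (rows : List (List (String × String))) :
    ∀ acc : List String,
      rows.foldl (fun errors row =>
        if !(pvRequired row) then errors
        else if pvMid row == "" then errors ++ ["refuse.compat_matrix_migration_id"]
        else if !(PySem.Set.contains avail (pvMid row)) then errors ++ ["refuse.compat_matrix_missing_migration"]
        else errors) acc = acc ++ rows.flatMap (pvRowErrs avail) := by
  induction rows with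
  | nil => intro acc; simp
  | cons r t ih =>
      intro acc
      simp only [List.foldl, List.flatMap_cons, ih, pvRowErrs]
      split_ifs <;> simp

theorem pvMem_e1 (avail : PySem.Set String) (rows : List (List (String × String))) :
    ("refuse.compat_matrix_migration_id" ∈ rows.flatMap (pvRowErrs avail)) ↔
      ((rows.filter (fun row => pvRequired row)).map pvMid).any (fun mid => mid == "") = true := by
  induction rows with
  | nil => simp
  | cons r t ih =>
      simp only [List.flatMap_cons, List.mem_append, ih, List.filter_cons, pvRowErrs]
      by_cases hr : pvRequired r <;> by_cases hm : pvMid r == "" <;>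
        simp [hr, hm]

theorem pvMem_e2 (avail : PySem.Set String) (rows : List (List (String × String))) :
    ("refuse.compat_matrix_missing_migration" ∈ rows.flatMap (pvRowErrs avail)) ↔
      ((rows.filter (fun row => pvRequired row)).map pvMid).any
        (fun mid => !(mid == "") && !(PySem.Set.contains avail mid)) = true := by
  induction rows with
  | nil => simp
  | cons r t ih =>
      simp only [List.flatMap_cons, List.mem_append, ih, List.filter_cons, pvRowErrs]
      by_cases hr : pvRequired r <;> by_cases hm : pvMid r == "" <;>
        by_cases hc : PySem.Set.contains avail (pvMid r) <;> simp [*]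

theorem pvAllErrs (avail : PySem.Set String) (rows : List (List (String × String))) :
    ∀ x ∈ rows.flatMap (pvRowErrs avail),
      x = "refuse.compat_matrix_migration_id" ∨ x = "refuse.compat_matrix_missing_migration" := by
  intro x hx
  rcases List.mem_flatMap.mp hx with ⟨r, _, hr⟩
  unfold pvRowErrs at hr
  split_ifs at hr <;> simp_all

theorem pvSortedSet (l : List String)
    (hall : ∀ x ∈ l, x = "refuse.compat_matrix_migration_id" ∨ x = "refuse.compat_matrix_missing_migration") :
    PySem.List.sorted (PySem.Set.ofList l) (fun x => x) false =
      (if "refuse.compat_matrix_migration_id" ∈ l then ["refuse.compat_matrix_migration_id"] else []) ++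
      (if "refuse.compat_matrix_missing_migration" ∈ l then ["refuse.compat_matrix_missing_migration"] else []) := by
  by_cases h1 : "refuse.compat_matrix_migration_id" ∈ l <;>
    by_cases h2 : "refuse.compat_matrix_missing_migration" ∈ l <;>
    simp only [h1, h2, if_pos, if_neg, not_false_iff, List.append_nil, List.nil_append]
  · refine PySem.List.sorted_eq_of_perm_of_pairwise_lt _ ["refuse.compat_matrix_migration_id", "refuse.compat_matrix_missing_migration"] _ ?_ (by
      refine List.pairwise_cons.mpr ⟨?_, by simp⟩
      intro b hb
      rw [List.mem_singleton] at hb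
      subst hb
      exact pvE1_lt_E2)
    refine (List.perm_ext_iff_of_nodup (by decide) (PySem.Set.nodup_ofList l)).mpr ?_
    intro a
    simp only [PySem.Set.mem_ofList, List.mem_cons, List.not_mem_nil, or_false]
    constructor
    · rintro (rfl | rfl) <;> assumption
    · intro ha; rcases hall a ha with rfl | rfl <;> simp
  · refine PySem.List.sorted_eq_of_perm_of_pairwise_lt _ ["refuse.compat_matrix_migration_id"] _ ?_ (by simp)
    refine (List.perm_ext_iff_of_nodup (by decide) (PySem.Set.nodup_ofList l)).mpr ?_
    intro a
    simp only [PySem.Set.mem_ofList, List.mem_cons, List.not_mem_nil, or_false]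
    constructor
    · rintro rfl; assumption
    · intro ha; rcases hall a ha with rfl | rfl
      · rfl
      · exact absurd ha h2
  · refine PySem.List.sorted_eq_of_perm_of_pairwise_lt _ ["refuse.compat_matrix_missing_migration"] _ ?_ (by simp)
    refine (List.perm_ext_iff_of_nodup (by decide) (PySem.Set.nodup_ofList l)).mpr ?_
    intro a
    simp only [PySem.Set.mem_ofList, List.mem_cons, List.not_mem_nil, or_false]
    constructor
    · rintro rfl; assumption
    · intro ha; rcases hall a ha with rfl | rfl
      · exact absurd ha h1
      · rfl
  · have hl : l = [] := by
      cases l with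
      | nil => rfl
      | cons x t =>
          rcases hall x (List.mem_cons_self) with rfl | rfl
          · exact absurd List.mem_cons_self h1
          · exact absurd List.mem_cons_self h2
    subst hl; decide

-- ===== VERDICT (by name: the statement is the Claim_ definition above) =====
theorem validate_matrix_coverage_spec : Claim_equal_validate_matrix_coverage := by
  intro me mi _
  unfold Spec_validate_matrix_coverage validate_matrix_coverage validate_matrix_coverage_alt
  simp only [pvFoldA (pvAvailable mi) me [], List.nil_append]
  rw [pvSortedSet _ (pvAllErrs (pvAvailable mi) me)]
  simp only [pvMem_e1, pvMem_e2]
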